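-- pv_equiv track=rewrite | github.com/TransitInsight/vt_analytics | views/view_fault_trend.py | update_offset
-- ===== SOURCE A (Python) =====
-- def update_offset(triggeredItems, data):
--     data = data or {'offset': 0}
--     offset = 0
--
--     if any ('vft_button_prev_page.n_clicks' == item['prop_id'] for item in triggeredItems):
--         offset = -2
--     elif any ('vft_button_next_page.n_clicks' == item['prop_id'] for item in triggeredItems):
--         offset = 2
--     elif any ('vft_button_prev.n_clicks' == item['prop_id'] for item in triggeredItems):
--         offset = -1
--     elif any ('vft_button_next.n_clicks' == item['prop_id'] for item in triggeredItems):
--         offset = 1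
--
--     data['offset'] = data['offset'] + offset #-prev_page * 2 - prev + next + 2*next_page
--
--     return data
-- ===== SOURCE B (Python) =====
-- # B: a min-reduction — map each triggered prop_id to a priority rank via a lookup
-- # table and take the minimum rank over all items, then index a fixed offset tuple,
-- # instead of A's four prioritized any() scans. Mutates `data` in place (when
-- # truthy) exactly as A does; equivalence is about the return value.
-- RANK = {'vft_button_prev_page.n_clicks': 0,
--         'vft_button_next_page.n_clicks': 1,
--         'vft_button_prev.n_clicks': 2,
--         'vft_button_next.n_clicks': 3}
-- OFFSETS = (-2, 2, -1, 1, 0)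
--
-- def update_offset(triggeredItems, data):
--     best = min((RANK.get(item['prop_id'], 4) for item in triggeredItems), default=4)
--     data = data or {'offset': 0}
--     data['offset'] = data['offset'] + OFFSETS[best]
--     return data
-- ===== Notes on version B (the rewrite author's own statement) =====
-- stated objective: alternative
-- what changed: Replaces the four prioritized short-circuiting any() scans with a single min-reduction: each item's prop_id is mapped to a priority rank by a lookup table, the minimum rank over all items is taken, and a fixed offset tuple is indexed by it.
import Mathlib
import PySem

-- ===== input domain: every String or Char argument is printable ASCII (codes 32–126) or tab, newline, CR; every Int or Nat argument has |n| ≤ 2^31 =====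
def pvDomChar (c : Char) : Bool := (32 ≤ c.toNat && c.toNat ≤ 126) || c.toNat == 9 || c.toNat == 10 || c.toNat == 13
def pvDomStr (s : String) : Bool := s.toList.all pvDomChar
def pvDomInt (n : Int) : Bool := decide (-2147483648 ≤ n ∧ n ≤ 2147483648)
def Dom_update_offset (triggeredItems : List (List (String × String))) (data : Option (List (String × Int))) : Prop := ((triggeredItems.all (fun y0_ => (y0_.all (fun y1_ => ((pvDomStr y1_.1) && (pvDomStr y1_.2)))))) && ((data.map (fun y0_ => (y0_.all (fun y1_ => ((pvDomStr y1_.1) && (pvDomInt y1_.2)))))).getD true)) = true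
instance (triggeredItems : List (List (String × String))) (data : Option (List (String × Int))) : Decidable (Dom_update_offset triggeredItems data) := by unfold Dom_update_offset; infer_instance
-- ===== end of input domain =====

-- B maps each item's prop_id to a priority rank through a lookup table, takes the minimum
-- rank over all items in one reduction, and indexes a fixed offset tuple — instead of A's
-- four prioritized any() scans; return values are proved equal on Pre_.
-- (Both Pythons mutate `data` in place when it is truthy; the equivalence is about the return value.)

-- ===== PORT A =====
-- item['prop_id'] (faithful under Pre_, which guarantees the key is present)
def pidOf (item : List (String × String)) : String :=
  (PySem.Dict.ofList item).getD "prop_id" ""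

-- data = data or {'offset': 0}  (None and the empty dict are falsy)
def orDefault (data : Option (List (String × Int))) : PySem.Dict String Int :=
  match data with
  | none => PySem.Dict.ofList [("offset", 0)]
  | some l => if l.isEmpty then PySem.Dict.ofList [("offset", 0)] else PySem.Dict.ofList l

def update_offset (triggeredItems : List (List (String × String))) (data : Option (List (String × Int))) : List (String × Int) :=
  let d := orDefault data
  let offset : Int :=
    if triggeredItems.any (fun item => "vft_button_prev_page.n_clicks" == pidOf item) then -2
    else if triggeredItems.any (fun item => "vft_button_next_page.n_clicks" == pidOf item) then 2
    else if triggeredItems.any (fun item => "vft_button_prev.n_clicks" == pidOf item) then -1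
    else if triggeredItems.any (fun item => "vft_button_next.n_clicks" == pidOf item) then 1
    else 0
  (d.insert "offset" (d.getD "offset" 0 + offset)).items

-- ===== PORT B =====
-- the module-level RANK dict and OFFSETS tuple of Source B
def rankTable : PySem.Dict String Int :=
  PySem.Dict.ofList [("vft_button_prev_page.n_clicks", 0), ("vft_button_next_page.n_clicks", 1),
                     ("vft_button_prev.n_clicks", 2), ("vft_button_next.n_clicks", 3)]

def offsetsTable : List Int := [-2, 2, -1, 1, 0]

def update_offset_alt (triggeredItems : List (List (String × String))) (data : Option (List (String × Int))) : List (String × Int) :=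
  -- best = min((RANK.get(item['prop_id'], 4) for item in triggeredItems), default=4)
  let best : Int := triggeredItems.foldl (fun acc item => min acc (rankTable.getD (pidOf item) 4)) 4
  let d := orDefault data
  -- OFFSETS[best]: best is always in range 0..4, so pyGetD is exact here
  (d.insert "offset" (d.getD "offset" 0 + PySem.List.pyGetD offsetsTable best 0)).items

-- ===== PRECONDITION & SPEC =====
-- Pre_ excludes items whose dict lacks 'prop_id' (A raises KeyError there unless an earlier
-- any() short-circuited past the item — an artefact of A's scan order — and B raises) and a
-- non-empty data dict lacking 'offset' (both raise KeyError).
def Pre_update_offset (triggeredItems : List (List (String × String))) (data : Option (List (String × Int))) : Prop :=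
  (triggeredItems.all (fun item => (PySem.Dict.ofList item).contains "prop_id")) = true ∧
  ((data.getD []).isEmpty = true ∨ (PySem.Dict.ofList (data.getD [])).contains "offset" = true)
instance (triggeredItems : List (List (String × String))) (data : Option (List (String × Int))) : Decidable (Pre_update_offset triggeredItems data) := by unfold Pre_update_offset; infer_instance
def pvWitness_update_offset : (List (List (String × String))) × (Option (List (String × Int))) :=
  ([[("prop_id", "vft_button_next.n_clicks")]], some [("offset", 5)])
def Spec_update_offset (triggeredItems : List (List (String × String))) (data : Option (List (String × Int))) (out : List (String × Int)) : Prop := out = update_offset_alt triggeredItems data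
instance (triggeredItems : List (List (String × String))) (data : Option (List (String × Int))) (out : List (String × Int)) : Decidable (Spec_update_offset triggeredItems data out) := by unfold Spec_update_offset; infer_instance

-- ===== CLAIM (what is proved, stated in full; the proofs are below) =====
def Claim_equal_update_offset : Prop := ∀ (triggeredItems : List (List (String × String))) (data : Option (List (String × Int))), Dom_update_offset triggeredItems data → Pre_update_offset triggeredItems data → Spec_update_offset triggeredItems data (update_offset triggeredItems data)

-- ===== LEMMAS AND PROOFS =====
-- rank of one prop_id, written out: RANK.get(s, 4) as an if-chain
theorem rk_eq (s : String) : rankTable.getD s 4 =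
    (if s == "vft_button_prev_page.n_clicks" then 0
     else if s == "vft_button_next_page.n_clicks" then 1
     else if s == "vft_button_prev.n_clicks" then 2
     else if s == "vft_button_next.n_clicks" then 3 else 4) := by
  have h : rankTable = PySem.Dict.mk [("vft_button_prev_page.n_clicks", 0), ("vft_button_next_page.n_clicks", 1),
                     ("vft_button_prev.n_clicks", 2), ("vft_button_next.n_clicks", 3)] := by decide
  rw [h, PySem.Dict.getD_eq_get?_getD]
  by_cases h1 : s = "vft_button_prev_page.n_clicks"; · subst h1; decide
  by_cases h2 : s = "vft_button_next_page.n_clicks"; · subst h2; decide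
  by_cases h3 : s = "vft_button_prev.n_clicks"; · subst h3; decide
  by_cases h4 : s = "vft_button_next.n_clicks"; · subst h4; decide
  simp only [PySem.Dict.get?_mk_cons, beq_iff_eq,
    if_neg h1, if_neg h2, if_neg h3, if_neg h4,
    if_neg (fun e => h1 (Eq.symm e)), if_neg (fun e => h2 (Eq.symm e)),
    if_neg (fun e => h3 (Eq.symm e)), if_neg (fun e => h4 (Eq.symm e))]
  simp [PySem.Dict.get?]

-- abbreviation used only by the proofs: the rank of one item
def rk (item : List (String × String)) : Int := rankTable.getD (pidOf item) 4

theorem rk_bounds (item : List (String × String)) : 0 ≤ rk item ∧ rk item ≤ 4 := by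
  unfold rk; rw [rk_eq]; split_ifs <;> omega

theorem rk_eq_zero_iff (item : List (String × String)) :
    rk item = 0 ↔ pidOf item = "vft_button_prev_page.n_clicks" := by
  unfold rk; rw [rk_eq]; split_ifs with h1 h2 h3 h4 <;> simp_all [beq_iff_eq]

theorem rk_eq_one_iff (item : List (String × String)) :
    rk item = 1 ↔ pidOf item = "vft_button_next_page.n_clicks" := by
  unfold rk; rw [rk_eq]; split_ifs with h1 h2 h3 h4 <;> simp_all [beq_iff_eq]

theorem rk_eq_two_iff (item : List (String × String)) :
    rk item = 2 ↔ pidOf item = "vft_button_prev.n_clicks" := by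
  unfold rk; rw [rk_eq]; split_ifs with h1 h2 h3 h4 <;> simp_all [beq_iff_eq]

theorem rk_eq_three_iff (item : List (String × String)) :
    rk item = 3 ↔ pidOf item = "vft_button_next.n_clicks" := by
  unfold rk; rw [rk_eq]; split_ifs with h1 h2 h3 h4 <;> simp_all [beq_iff_eq]

-- the min-fold is bounded by its initial value and every element
theorem foldl_min_le_init (l : List (List (String × String))) (a : Int) :
    l.foldl (fun acc item => min acc (rk item)) a ≤ a := by
  induction l generalizing a with
  | nil => simp
  | cons x xs ih => exact le_trans (ih (min a (rk x))) (min_le_left _ _)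

theorem foldl_min_le_mem (l : List (List (String × String))) (a : Int)
    (item : List (String × String)) (h : item ∈ l) :
    l.foldl (fun acc item => min acc (rk item)) a ≤ rk item := by
  induction l generalizing a with
  | nil => cases h
  | cons x xs ih =>
    rcases List.mem_cons.mp h with h | h
    · subst h
      exact le_trans (foldl_min_le_init xs (min a (rk item))) (min_le_right _ _)
    · exact ih _ h

theorem foldl_min_mem (l : List (List (String × String))) (a : Int) :
    l.foldl (fun acc item => min acc (rk item)) a = a ∨
    ∃ item ∈ l, l.foldl (fun acc item => min acc (rk item)) a = rk item := by
  induction l generalizing a with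
  | nil => exact Or.inl rfl
  | cons x xs ih =>
    rcases ih (min a (rk x)) with h | ⟨item, hmem, heq⟩
    · rcases min_cases a (rk x) with ⟨he, _⟩ | ⟨he, _⟩
      · exact Or.inl (by simpa [he] using h)
      · exact Or.inr ⟨x, List.mem_cons_self, by simpa [he] using h⟩
    · exact Or.inr ⟨item, List.mem_cons_of_mem _ hmem, heq⟩

-- the core: A's prioritized any() chain computes OFFSETS[min rank]
theorem off_core (ti : List (List (String × String))) :
    (if ti.any (fun item => "vft_button_prev_page.n_clicks" == pidOf item) then (-2 : Int)
     else if ti.any (fun item => "vft_button_next_page.n_clicks" == pidOf item) then 2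
     else if ti.any (fun item => "vft_button_prev.n_clicks" == pidOf item) then -1
     else if ti.any (fun item => "vft_button_next.n_clicks" == pidOf item) then 1
     else 0)
    = PySem.List.pyGetD offsetsTable
        (ti.foldl (fun acc item => min acc (rankTable.getD (pidOf item) 4)) 4) 0 := by
  have hfold : ti.foldl (fun acc item => min acc (rankTable.getD (pidOf item) 4)) 4
      = ti.foldl (fun acc item => min acc (rk item)) 4 := rfl
  rw [hfold]
  set m := ti.foldl (fun acc item => min acc (rk item)) 4 with hm
  have hub : m ≤ 4 := foldl_min_le_init ti 4
  have hlb : 0 ≤ m := by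
    clear hub
    rcases foldl_min_mem ti 4 with h | ⟨item, _, h⟩
    · omega
    · rw [← hm] at h; rw [h]; exact (rk_bounds item).1
  have hle : ∀ item ∈ ti, m ≤ rk item := fun item h => foldl_min_le_mem ti 4 item h
  have hmem : m = 4 ∨ ∃ item ∈ ti, m = rk item := foldl_min_mem ti 4
  have hany : ∀ (s : String), (ti.any (fun item => s == pidOf item) = true) ↔
      ∃ item ∈ ti, pidOf item = s := by
    intro s
    simp only [List.any_eq_true, beq_iff_eq]
    exact ⟨fun ⟨i, h1, h2⟩ => ⟨i, h1, h2.symm⟩, fun ⟨i, h1, h2⟩ => ⟨i, h1, h2.symm⟩⟩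
  have h5 : m = 0 ∨ m = 1 ∨ m = 2 ∨ m = 3 ∨ m = 4 := by omega
  rcases h5 with h | h | h | h | h <;> rw [h]
  · rw [if_pos]
    · decide
    · rcases hmem with h4 | ⟨item, hit, hr⟩
      · omega
      · exact (hany _).mpr ⟨item, hit, (rk_eq_zero_iff item).mp (by omega)⟩
  · rw [if_neg, if_pos]
    · decide
    · rcases hmem with h4 | ⟨item, hit, hr⟩
      · omega
      · exact (hany _).mpr ⟨item, hit, (rk_eq_one_iff item).mp (by omega)⟩
    · intro hc
      rcases (hany _).mp hc with ⟨item, hit, hp⟩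
      have := hle item hit
      rw [(rk_eq_zero_iff item).mpr hp] at this; omega
  · rw [if_neg, if_neg, if_pos]
    · decide
    · rcases hmem with h4 | ⟨item, hit, hr⟩
      · omega
      · exact (hany _).mpr ⟨item, hit, (rk_eq_two_iff item).mp (by omega)⟩
    · intro hc
      rcases (hany _).mp hc with ⟨item, hit, hp⟩
      have := hle item hit
      rw [(rk_eq_one_iff item).mpr hp] at this; omega
    · intro hc
      rcases (hany _).mp hc with ⟨item, hit, hp⟩
      have := hle item hit
      rw [(rk_eq_zero_iff item).mpr hp] at this; omega
  · rw [if_neg, if_neg, if_neg, if_pos]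
    · decide
    · rcases hmem with h4 | ⟨item, hit, hr⟩
      · omega
      · exact (hany _).mpr ⟨item, hit, (rk_eq_three_iff item).mp (by omega)⟩
    · intro hc
      rcases (hany _).mp hc with ⟨item, hit, hp⟩
      have := hle item hit
      rw [(rk_eq_two_iff item).mpr hp] at this; omega
    · intro hc
      rcases (hany _).mp hc with ⟨item, hit, hp⟩
      have := hle item hit
      rw [(rk_eq_one_iff item).mpr hp] at this; omega
    · intro hc
      rcases (hany _).mp hc with ⟨item, hit, hp⟩
      have := hle item hit
      rw [(rk_eq_zero_iff item).mpr hp] at this; omega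
  · rw [if_neg, if_neg, if_neg, if_neg]
    · decide
    all_goals
      intro hc
      rcases (hany _).mp hc with ⟨item, hit, hp⟩
      have := hle item hit
      first
        | rw [(rk_eq_zero_iff item).mpr hp] at this
        | rw [(rk_eq_one_iff item).mpr hp] at this
        | rw [(rk_eq_two_iff item).mpr hp] at this
        | rw [(rk_eq_three_iff item).mpr hp] at this
      omega

-- ===== VERDICT (by name: the statement is the Claim_ definition above) =====
theorem update_offset_spec : Claim_equal_update_offset := by
  intro ti data _ _
  unfold Spec_update_offset update_offset update_offset_alt
  rw [off_core]
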